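-- pv_equiv track=rewrite | github.com/rajatjain/cataloguesearch | tests/backend/common.py | are_dicts_same
-- ===== SOURCE A (Python) =====
-- def are_dicts_same(dict1: dict[str, list[str]], dict2: dict[str, list[str]]) -> bool:
--     """
--     Compares two dictionaries of the format {str: list[str]} to ensure they are the same,
--     regardless of key order or element order within the lists.
--
--     Args:
--         dict1: The first dictionary.
--         dict2: The second dictionary.
--
--     Returns:
--         True if the dictionaries are considered the same, False otherwise.
--     """
--
--     # 1. Check if the sets of keys are identical
--     if set(dict1.keys()) != set(dict2.keys()):
--         return False
--
--     # 2. Iterate through keys and compare their corresponding lists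
--     for key in dict1:
--         list1 = dict1[key]
--         list2 = dict2[key]
--
--         # Check if the lengths of the lists are the same
--         if len(list1) != len(list2):
--             return False
--
--         # Convert lists to sets for order-independent comparison of elements
--         if set(list1) != set(list2):
--             return False
--
--     return True
-- ===== SOURCE B (Python) =====
-- def are_dicts_same(dict1: dict[str, list[str]], dict2: dict[str, list[str]]) -> bool:
--     """Sort-based canonicalization: each dict becomes a key-sorted list of
--     (key, (len, sorted distinct elements)) records; equality of the two
--     canonical lists is dict equality up to key order and element order."""
--     def canon(d):
--         return sorted(((k, (len(v), sorted(set(v)))) for k, v in d.items()),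
--                       key=lambda item: item[0])
--     return canon(dict1) == canon(dict2)
-- ===== Notes on version B (the rewrite author's own statement) =====
-- stated objective: alternative
-- what changed: Replaces A's hash-set key comparison plus short-circuit per-key loop with a sort-based canonicalization: each dict is turned into a key-sorted list of (key, (len, sorted distinct elements)) records and the two canonical lists are compared structurally once.
import Mathlib
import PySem

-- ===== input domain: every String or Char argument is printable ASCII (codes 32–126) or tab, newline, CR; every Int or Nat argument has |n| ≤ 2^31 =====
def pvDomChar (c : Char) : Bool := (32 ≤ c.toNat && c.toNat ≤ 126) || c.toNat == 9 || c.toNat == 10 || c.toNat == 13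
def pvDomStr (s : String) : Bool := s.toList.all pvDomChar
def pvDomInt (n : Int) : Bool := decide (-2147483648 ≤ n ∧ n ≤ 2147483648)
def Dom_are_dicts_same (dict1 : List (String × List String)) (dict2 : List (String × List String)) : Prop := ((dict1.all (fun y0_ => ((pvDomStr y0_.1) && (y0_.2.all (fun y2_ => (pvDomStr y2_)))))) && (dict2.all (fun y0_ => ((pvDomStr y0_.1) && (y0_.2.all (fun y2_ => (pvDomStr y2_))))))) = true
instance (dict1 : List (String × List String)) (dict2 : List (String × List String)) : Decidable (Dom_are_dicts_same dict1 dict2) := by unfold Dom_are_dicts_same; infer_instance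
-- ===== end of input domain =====

-- B replaces A's hash-set checks and short-circuit loop by a sort-based canonical form compared once (objective: alternative).

-- ===== PORT A =====
def are_dicts_same (dict1 : List (String × List String)) (dict2 : List (String × List String)) : Bool :=
  let d1 := PySem.Dict.ofList dict1
  let d2 := PySem.Dict.ofList dict2
  -- if set(dict1.keys()) != set(dict2.keys()): return False
  if !(PySem.Set.equal (PySem.Set.ofList d1.keys) (PySem.Set.ofList d2.keys)) then false
  else
    -- for key in dict1: …  (the early 'return False's become the short-circuit of List.all)
    d1.keys.all (fun key =>
      let list1 := d1.getD key []   -- dict1[key]; total here: key ∈ d1, and key ∈ d2 since the key sets matched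
      let list2 := d2.getD key []
      if list1.length != list2.length then false
      else if !(PySem.Set.equal (PySem.Set.ofList list1) (PySem.Set.ofList list2)) then false
      else true)

-- ===== PORT B =====
-- (k, (len(v), sorted(set(v)))) — one canonical record per item
def pvRec (p : String × List String) : String × Int × List String :=
  (p.1, ((p.2.length : Int), PySem.List.sorted (PySem.Set.ofList p.2) (fun x => x) false))

-- sorted((… for k, v in d.items()), key=lambda item: item[0])
def pvCanon (d : PySem.Dict String (List String)) : List (String × Int × List String) :=
  PySem.List.sorted (d.items.map pvRec) (fun item => item.1) false

def are_dicts_same_alt (dict1 : List (String × List String)) (dict2 : List (String × List String)) : Bool :=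
  pvCanon (PySem.Dict.ofList dict1) == pvCanon (PySem.Dict.ofList dict2)

-- ===== PRECONDITION & SPEC =====
def Spec_are_dicts_same (dict1 : List (String × List String)) (dict2 : List (String × List String)) (out : Bool) : Prop := out = are_dicts_same_alt dict1 dict2
instance (dict1 : List (String × List String)) (dict2 : List (String × List String)) (out : Bool) : Decidable (Spec_are_dicts_same dict1 dict2 out) := by unfold Spec_are_dicts_same; infer_instance

-- ===== CLAIM (what is proved, stated in full; the proofs are below) =====
def Claim_equal_are_dicts_same : Prop := ∀ (dict1 : List (String × List String)) (dict2 : List (String × List String)), Dom_are_dicts_same dict1 dict2 → Spec_are_dicts_same dict1 dict2 (are_dicts_same dict1 dict2)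

-- ===== LEMMAS AND PROOFS =====

theorem mapfst_map_pvRec (d : PySem.Dict String (List String)) :
    ((d.items.map pvRec).map (·.1)) = d.keys := by
  rw [List.map_map]
  rfl

theorem nodup_map_pvRec (d : PySem.Dict String (List String)) (h : d.keys.Nodup) :
    (d.items.map pvRec).Nodup := by
  refine List.Nodup.of_map (·.1) ?_
  rw [mapfst_map_pvRec]
  exact h

-- canonical lists are equal iff the record lists are permutations of each other
theorem canon_eq_iff_perm (d1 d2 : PySem.Dict String (List String))
    (h1 : d1.keys.Nodup) (_h2 : d2.keys.Nodup) :
    pvCanon d1 = pvCanon d2 ↔ (d1.items.map pvRec).Perm (d2.items.map pvRec) := by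
  constructor
  · intro h
    have p1 := PySem.List.sorted_perm (d1.items.map pvRec) (fun item => item.1) false
    have p2 := PySem.List.sorted_perm (d2.items.map pvRec) (fun item => item.1) false
    exact (p1.symm.trans (h ▸ p2 : (pvCanon d1).Perm (d2.items.map pvRec)))
  · intro hp
    have p1 := PySem.List.sorted_perm (d1.items.map pvRec) (fun item => item.1) false
    have ple : (pvCanon d1).Pairwise (fun a b => a.1 ≤ b.1) :=
      PySem.List.sorted_pairwise (d1.items.map pvRec) (fun item => item.1)
    have hnd : ((pvCanon d1).map (·.1)).Nodup := by
      have : ((pvCanon d1).map (·.1)).Perm d1.keys := by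
        rw [← mapfst_map_pvRec d1]
        exact p1.map (·.1)
      exact this.nodup_iff.2 h1
    have pne : (pvCanon d1).Pairwise (fun a b => a.1 ≠ b.1) := by
      rw [List.Nodup, List.pairwise_map] at hnd
      exact hnd
    have plt : (pvCanon d1).Pairwise (fun a b => a.1 < b.1) :=
      (ple.and pne).imp (fun h => lt_of_le_of_ne h.1 h.2)
    have hperm : (pvCanon d1).Perm (d2.items.map pvRec) := p1.trans hp
    have := PySem.List.sorted_eq_of_perm_of_pairwise_lt _ _ _ hperm plt
    exact this.symm

-- both programs test the same condition: the record lists are permutations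
theorem mem_keys_of_get?_some (d : PySem.Dict String (List String)) (k : String) (v : List String)
    (h : d.get? k = some v) : k ∈ d.keys := by
  by_contra hk
  rw [← PySem.Dict.get?_eq_none_iff_not_mem_keys] at hk
  simp [h] at hk

theorem get?_some_of_mem_keys (d : PySem.Dict String (List String)) (k : String)
    (h : k ∈ d.keys) : ∃ v, d.get? k = some v := by
  cases hc : d.get? k with
  | none => exact absurd ((PySem.Dict.get?_eq_none_iff_not_mem_keys _ _).1 hc) (by simp [h])
  | some v => exact ⟨v, rfl⟩

theorem pvRec_congr (k : String) (v w : List String) (hlen : v.length = w.length)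
    (hmem : ∀ x, x ∈ PySem.Set.ofList v ↔ x ∈ PySem.Set.ofList w) :
    pvRec (k, v) = pvRec (k, w) := by
  unfold pvRec
  have hperm : (PySem.Set.ofList v).Perm (PySem.Set.ofList w) :=
    (List.perm_ext_iff_of_nodup (PySem.Set.nodup_ofList v) (PySem.Set.nodup_ofList w)).2 hmem
  have hsort := (PySem.List.sorted_id_eq_sorted_id_iff_perm _ _).2 hperm
  simp [hlen, hsort]

-- one inclusion of the membership argument (used in both directions)
theorem mem_map_pvRec_mono (d d' : PySem.Dict String (List String))
    (h1 : d.keys.Nodup) (_h2 : d'.keys.Nodup)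
    (hkeys : ∀ x ∈ d.keys, x ∈ d'.keys)
    (hcond : ∀ k v w, d.get? k = some v → d'.get? k = some w → pvRec (k, v) = pvRec (k, w)) :
    ∀ x ∈ d.items.map pvRec, x ∈ d'.items.map pvRec := by
  intro x hx
  obtain ⟨p, hp, rfl⟩ := List.mem_map.1 hx
  have hv : d.get? p.1 = some p.2 := PySem.Dict.get?_of_mem_items d (by simpa using hp) h1
  have hk2 : p.1 ∈ d'.keys := hkeys p.1 (PySem.Dict.mem_keys_of_mem_items d hp)
  obtain ⟨w, hw⟩ := get?_some_of_mem_keys d' p.1 hk2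
  have heq : pvRec (p.1, p.2) = pvRec (p.1, w) := hcond p.1 p.2 w hv hw
  have : pvRec (p.1, w) ∈ d'.items.map pvRec :=
    List.mem_map.2 ⟨(p.1, w), PySem.Dict.mem_items_of_get?_eq_some d' hw, rfl⟩
  simpa [← heq] using this

theorem perm_iff_cond (d1 d2 : PySem.Dict String (List String))
    (h1 : d1.keys.Nodup) (h2 : d2.keys.Nodup) :
    (d1.items.map pvRec).Perm (d2.items.map pvRec) ↔
      ((∀ x, x ∈ d1.keys ↔ x ∈ d2.keys) ∧
       ∀ k v w, d1.get? k = some v → d2.get? k = some w →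
         v.length = w.length ∧ (∀ x, x ∈ PySem.Set.ofList v ↔ x ∈ PySem.Set.ofList w)) := by
  constructor
  · intro hp
    have hkeys : d1.keys.Perm d2.keys := by
      have := hp.map (·.1)
      rwa [mapfst_map_pvRec, mapfst_map_pvRec] at this
    refine ⟨fun x => hkeys.mem_iff, ?_⟩
    intro k v w hv hw
    have hm1 : pvRec (k, v) ∈ d1.items.map pvRec :=
      List.mem_map.2 ⟨(k, v), PySem.Dict.mem_items_of_get?_eq_some d1 hv, rfl⟩
    have hm2 : pvRec (k, v) ∈ d2.items.map pvRec := hp.mem_iff.1 hm1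
    obtain ⟨p, hp2, hpe⟩ := List.mem_map.1 hm2
    have hfst : p.1 = k := congrArg Prod.fst hpe
    have hv2 : d2.get? k = some p.2 := by
      have : (k, p.2) ∈ d2.items := by rw [← hfst]; exact hp2
      exact PySem.Dict.get?_of_mem_items d2 this h2
    have hwp : p.2 = w := by rw [hv2] at hw; exact Option.some.inj hw
    subst hwp
    have hsnd := congrArg Prod.snd hpe
    unfold pvRec at hsnd
    simp only at hsnd
    have hlen := congrArg Prod.fst hsnd
    have hsort := congrArg Prod.snd hsnd
    simp only at hlen hsort
    refine ⟨by exact_mod_cast hlen.symm, ?_⟩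
    have hperm := (PySem.List.sorted_id_eq_sorted_id_iff_perm _ _).1 hsort.symm
    exact fun x => hperm.mem_iff
  · rintro ⟨hk, hv⟩
    refine (List.perm_ext_iff_of_nodup (nodup_map_pvRec d1 h1) (nodup_map_pvRec d2 h2)).2 ?_
    intro x
    constructor
    · exact fun hx => mem_map_pvRec_mono d1 d2 h1 h2 (fun y hy => (hk y).1 hy)
        (fun k v w hv1 hw1 => pvRec_congr k v w (hv k v w hv1 hw1).1 (hv k v w hv1 hw1).2) x hx
    · exact fun hx => mem_map_pvRec_mono d2 d1 h2 h1 (fun y hy => (hk y).2 hy)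
        (fun k w v hw1 hv1 => (pvRec_congr k v w (hv k v w hv1 hw1).1 (hv k v w hv1 hw1).2).symm) x hx

-- A returns true exactly on that condition
theorem A_iff (dict1 dict2 : List (String × List String)) :
    are_dicts_same dict1 dict2 = true ↔
      ((∀ x, x ∈ (PySem.Dict.ofList dict1).keys ↔ x ∈ (PySem.Dict.ofList dict2).keys) ∧
       ∀ k v w, (PySem.Dict.ofList dict1).get? k = some v → (PySem.Dict.ofList dict2).get? k = some w →
         v.length = w.length ∧ (∀ x, x ∈ PySem.Set.ofList v ↔ x ∈ PySem.Set.ofList w)) := by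
  unfold are_dicts_same
  dsimp only
  set d1 := PySem.Dict.ofList dict1 with hd1
  set d2 := PySem.Dict.ofList dict2 with hd2
  have h1 : d1.keys.Nodup := PySem.Dict.nodup_keys_ofList _
  have h2 : d2.keys.Nodup := PySem.Dict.nodup_keys_ofList _
  rw [PySem.Set.ofList_eq_self_of_nodup _ h1, PySem.Set.ofList_eq_self_of_nodup _ h2]
  constructor
  · intro h
    by_cases heq : PySem.Set.equal d1.keys d2.keys = true
    · refine ⟨(PySem.Set.equal_iff _ _).1 heq, ?_⟩
      rw [heq] at h
      simp only [Bool.not_true, Bool.false_eq_true, if_false] at h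
      intro k v w hv hw
      have hk1 : k ∈ d1.keys := mem_keys_of_get?_some d1 k v hv
      have hg := List.all_eq_true.1 h k hk1
      simp only at hg
      rw [PySem.Dict.getD_of_get?_eq_some d1 [] hv, PySem.Dict.getD_of_get?_eq_some d2 [] hw] at hg
      split_ifs at hg with hL hS
      exact ⟨by simpa using hL, (PySem.Set.equal_iff _ _).1 (by simpa using hS)⟩
    · rw [eq_false_of_ne_true heq] at h
      simp at h
  · rintro ⟨hk, hv⟩
    have heq : PySem.Set.equal d1.keys d2.keys = true := (PySem.Set.equal_iff _ _).2 hk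
    rw [heq]
    simp only [Bool.not_true, Bool.false_eq_true, if_false]
    refine List.all_eq_true.2 ?_
    intro k hk1
    obtain ⟨v, hv1⟩ := get?_some_of_mem_keys d1 k hk1
    obtain ⟨w, hw1⟩ := get?_some_of_mem_keys d2 k ((hk k).1 hk1)
    obtain ⟨hlen, hmem⟩ := hv k v w hv1 hw1
    rw [PySem.Dict.getD_of_get?_eq_some d1 [] hv1, PySem.Dict.getD_of_get?_eq_some d2 [] hw1]
    have hS : PySem.Set.equal (PySem.Set.ofList v) (PySem.Set.ofList w) = true :=
      (PySem.Set.equal_iff _ _).2 hmem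
    simp [hlen, hS]

-- ===== VERDICT (by name: the statement is the Claim_ definition above) =====
theorem are_dicts_same_spec : Claim_equal_are_dicts_same := by
  intro dict1 dict2 _
  unfold Spec_are_dicts_same
  refine Bool.eq_iff_iff.2 ?_
  rw [A_iff]
  unfold are_dicts_same_alt
  rw [beq_iff_eq,
    canon_eq_iff_perm _ _ (PySem.Dict.nodup_keys_ofList _) (PySem.Dict.nodup_keys_ofList _),
    perm_iff_cond _ _ (PySem.Dict.nodup_keys_ofList _) (PySem.Dict.nodup_keys_ofList _)]
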